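-- pv_equiv track=rewrite | github.com/GaneshInduri9/Leetcode-150 | Leetcode-150/Graphs/number-of-distinct-islands-.py | countDistinctIslands
-- ===== SOURCE A (Python) =====
-- from typing import List
--
-- def countDistinctIslands(grid: List[List[int]]) -> int:
--     n = len(grid)
--     m = len(grid[0])
--     v = [[0 for _ in range(m)] for _ in range(n)]
--     directions = [[0, 1], [0, -1], [-1, 0], [1, 0]]
--     s = set()
--
--     def dfs(r, c, baser, basec, shape):
--         v[r][c] = 1
--         shape.add((r - baser, c - basec))
--
--         for dr, dc in directions:
--             newR = dr + r
--             newC = dc + c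
--
--             if (
--                 0 <= newR < n and 0 <= newC < m
--                 and v[newR][newC] == 0
--                 and grid[newR][newC] == 1
--             ):
--                 dfs(newR, newC, baser, basec, shape)
--
--     for i in range(n):
--         for j in range(m):
--             if grid[i][j] == 1 and not v[i][j]:
--                 shape = set()  # Initialize shape as a set
--                 # Start a DFS and record the shape of the island
--                 dfs(i, j, i, j, shape)
--                 s.add(frozenset(shape))  # Add the shape as a frozenset to the set
--
--     return len(s)
-- ===== SOURCE B (Python) =====
-- from typing import List
--
-- def countDistinctIslands(grid: List[List[int]]) -> int:
--     n = len(grid)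
--     m = len(grid[0])
--     visited = [[0] * m for _ in range(n)]
--     directions = [[0, 1], [0, -1], [-1, 0], [1, 0]]
--     shapes = set()
--
--     for i in range(n):
--         for j in range(m):
--             if grid[i][j] == 1 and not visited[i][j]:
--                 shape = set()
--                 stack = [(i, j)]
--                 while stack:
--                     r, c = stack.pop()
--                     if not (
--                         0 <= r < n and 0 <= c < m
--                         and visited[r][c] == 0
--                         and grid[r][c] == 1
--                     ):
--                         continue
--                     visited[r][c] = 1
--                     shape.add((r - i, c - j))
--                     # push in reverse so pop order follows the direction order
--                     for dr, dc in reversed(directions):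
--                         stack.append((r + dr, c + dc))
--                 shapes.add(frozenset(shape))
--
--     return len(shapes)
-- ===== Notes on version B (the rewrite author's own statement) =====
-- stated objective: alternative
-- what changed: Replaces the recursive DFS (closure mutating a shared visited matrix) by an iterative flood fill with an explicit stack: each island is traversed by popping cells, validating at pop time, marking, recording the relative offset, and pushing the four neighbours; no recursion and no inner function.
import Mathlib
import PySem

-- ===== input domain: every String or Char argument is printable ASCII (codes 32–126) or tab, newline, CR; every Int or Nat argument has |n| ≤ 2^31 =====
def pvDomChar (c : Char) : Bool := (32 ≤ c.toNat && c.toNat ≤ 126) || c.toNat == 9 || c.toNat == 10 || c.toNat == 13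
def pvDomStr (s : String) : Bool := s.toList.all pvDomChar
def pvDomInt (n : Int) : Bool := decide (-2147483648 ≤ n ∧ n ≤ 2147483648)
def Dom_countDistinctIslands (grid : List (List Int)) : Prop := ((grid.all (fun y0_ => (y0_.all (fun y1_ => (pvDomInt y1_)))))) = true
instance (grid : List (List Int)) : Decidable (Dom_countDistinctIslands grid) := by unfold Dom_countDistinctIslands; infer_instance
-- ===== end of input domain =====

-- B replaces A's recursive DFS by an iterative explicit-stack flood fill (same asymptotic cost); equal return value proved on Pre_.


-- Shared helpers: both Pythons read grid/visited the same way.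
-- directions = [[0, 1], [0, -1], [-1, 0], [1, 0]]
def pvDirections : List (Int × Int) := [(0, 1), (0, -1), (-1, 0), (1, 0)]

-- two-level read g[r][c]; 'some x' exactly when both indexings are in range (under the
-- Python bound guards 0<=r<n, 0<=c<m and Pre_ this is exactly Python's g[r][c])
def pvGet2 (g : List (List Int)) (r c : Int) : Option Int :=
  (PySem.List.pyGet? g r).bind (fun row => PySem.List.pyGet? row c)

-- the guard '0 <= r < n and 0 <= c < m and v[r][c] == 0 and g[r][c] == 1'
def pvValid (n m : Int) (g v : List (List Int)) (r c : Int) : Bool :=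
  decide (0 ≤ r) && decide (r < n) && decide (0 ≤ c) && decide (c < m) &&
    (pvGet2 v r c == some 0) && (pvGet2 g r c == some 1)

-- v[r][c] = 1 (indices are nonnegative whenever this is reached)
def pvMark (v : List (List Int)) (r c : Int) : List (List Int) :=
  v.modify r.toNat (fun row => row.set c.toNat 1)

-- number of unvisited entries, the termination measure of the flood fills
def pvCountZeros (v : List (List Int)) : Nat := (v.map (fun row => row.count 0)).sum

-- flood-fill state: (visited matrix, shape set of the current island)
abbrev PvState := List (List Int) × List (Int × Int)

-- ===== termination lemmas for the ports (cited by decreasing_by, hence above the ports) =====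
theorem pvValid_spec {n m : Int} {g v : List (List Int)} {r c : Int}
    (h : pvValid n m g v r c = true) :
    0 ≤ r ∧ r < n ∧ 0 ≤ c ∧ c < m ∧ pvGet2 v r c = some 0 ∧ pvGet2 g r c = some 1 := by
  simp only [pvValid, Bool.and_eq_true, decide_eq_true_eq, beq_iff_eq] at h
  tauto

theorem pvCount_set_lt (row : List Int) (j : Nat) (h : row[j]? = some 0) :
    (row.set j 1).count 0 < row.count 0 := by
  induction row generalizing j with
  | nil => simp at h
  | cons a t ih =>
    cases j with
    | zero =>
      simp at h
      subst h
      simp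
    | succ j =>
      simp at h
      have := ih j h
      simp [List.count_cons]
      omega

theorem pvCountZeros_modify_lt (v : List (List Int)) (i j : Nat)
    (h : (v[i]?.bind (fun row => row[j]?)) = some 0) :
    pvCountZeros (v.modify i (fun row => row.set j 1)) < pvCountZeros v := by
  induction v generalizing i with
  | nil => simp at h
  | cons a t ih =>
    cases i with
    | zero =>
      simp at h
      have := pvCount_set_lt a j h
      simp [pvCountZeros, List.modify]
      omega
    | succ i =>
      simp at h
      have := ih i h
      simp [pvCountZeros, List.modify] at this ⊢
      omega

theorem pvCountZeros_mark_lt {v : List (List Int)} {r c : Int}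
    (hr : 0 ≤ r) (hc : 0 ≤ c) (h : pvGet2 v r c = some 0) :
    pvCountZeros (pvMark v r c) < pvCountZeros v := by
  apply pvCountZeros_modify_lt
  simp only [pvGet2] at h
  cases hrow : PySem.List.pyGet? v r with
  | none => rw [hrow] at h; simp at h
  | some row =>
    rw [hrow] at h
    simp at h
    rw [PySem.List.pyGet?_of_nonneg v hr] at hrow
    rw [PySem.List.pyGet?_of_nonneg row hc] at h
    rw [hrow]
    simpa using h

-- ===== PORT A =====
-- the recursive dfs; 'fuel' is only a totality guard (never exhausted: each recursion
-- level marks one more zero entry, and the caller supplies fuel > number of zeros)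
mutual
def pvDfsA (g : List (List Int)) (n m : Int) :
    Nat → PvState → Int → Int → Int → Int → PvState
  | 0, st, _, _, _, _ => st
  | fuel + 1, st, r, c, br, bc =>
      pvDirsA g n m fuel (pvMark st.1 r c, PySem.Set.add st.2 (r - br, c - bc)) r c br bc
        pvDirections
termination_by fuel _ _ _ _ _ => (fuel, 0)

-- 'for dr, dc in directions: … if valid: dfs(newR, newC, …)'
def pvDirsA (g : List (List Int)) (n m : Int) :
    Nat → PvState → Int → Int → Int → Int → List (Int × Int) → PvState
  | _, st, _, _, _, _, [] => st
  | fuel, st, r, c, br, bc, d :: ds =>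
      let newR := d.1 + r
      let newC := d.2 + c
      if pvValid n m g st.1 newR newC then
        pvDirsA g n m fuel (pvDfsA g n m fuel st newR newC br bc) r c br bc ds
      else
        pvDirsA g n m fuel st r c br bc ds
termination_by fuel _ _ _ _ _ ds => (fuel, ds.length + 1)
end

-- s.add(frozenset(shape)): frozenset equality is equality AS SETS (PySem.Set.equal)
def pvAddShape (s : List (List (Int × Int))) (sh : List (Int × Int)) :
    List (List (Int × Int)) :=
  if s.any (fun t => PySem.Set.equal t sh) then s else s ++ [sh]

def countDistinctIslands (grid : List (List Int)) : Int :=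
  let n : Int := grid.length
  let m : Int := (grid.headD []).length   -- len(grid[0]); Python raises on []: excluded by Pre_
  let v0 : List (List Int) := List.replicate n.toNat (List.replicate m.toNat (0 : Int))
  let fuel : Nat := n.toNat * m.toNat + 1  -- totality guard only
  let fin :=
    (PySem.List.pyRange 0 n 1).foldl (fun acc i =>
      (PySem.List.pyRange 0 m 1).foldl (fun (acc : PvState × _) j =>
        -- 'grid[i][j] == 1 and not v[i][j]' (v entries are 0/1; reads in range under Pre_)
        if (pvGet2 grid i j == some 1) && (pvGet2 acc.1.1 i j == some 0) then
          let st := pvDfsA grid n m fuel (acc.1.1, PySem.Set.empty) i j i j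
          ((st.1, st.2), pvAddShape acc.2 st.2)
        else acc) acc)
      (((v0, (PySem.Set.empty : List (Int × Int))), ([] : List (List (Int × Int)))))
  fin.2.length

-- ===== PORT B =====
-- iterative flood fill: 'while stack: pop; if not valid: continue; mark; record; push
-- the four neighbours' — stack top is the list head
def pvFillB (g : List (List Int)) (n m br bc : Int) :
    PvState → List (Int × Int) → PvState
  | st, [] => st
  | st, (r, c) :: stk =>
      if _h : pvValid n m g st.1 r c then
        pvFillB g n m br bc (pvMark st.1 r c, PySem.Set.add st.2 (r - br, c - bc))
          (pvDirections.map (fun d => (r + d.1, c + d.2)) ++ stk)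
      else
        pvFillB g n m br bc st stk
termination_by st stk => (pvCountZeros st.1, stk.length)
decreasing_by
  · apply Prod.Lex.left
    obtain ⟨hr, _, hc, _, hv, _⟩ := pvValid_spec _h
    exact pvCountZeros_mark_lt hr hc hv
  · apply Prod.Lex.right
    simp

def countDistinctIslands_alt (grid : List (List Int)) : Int :=
  let n : Int := grid.length
  let m : Int := (grid.headD []).length
  let v0 : List (List Int) := List.replicate n.toNat (List.replicate m.toNat (0 : Int))
  let fin :=
    (PySem.List.pyRange 0 n 1).foldl (fun acc i =>
      (PySem.List.pyRange 0 m 1).foldl (fun (acc : PvState × _) j =>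
        if (pvGet2 grid i j == some 1) && (pvGet2 acc.1.1 i j == some 0) then
          let st := pvFillB grid n m i j (acc.1.1, PySem.Set.empty) [(i, j)]
          ((st.1, st.2), pvAddShape acc.2 st.2)
        else acc) acc)
      (((v0, (PySem.Set.empty : List (Int × Int))), ([] : List (List (Int × Int)))))
  fin.2.length

-- ===== PRECONDITION & SPEC =====
-- Pre_ is exactly where Python A (and B) return: a nonempty grid (grid[0] raises
-- IndexError on []) whose rows all have at least len(grid[0]) entries (the scan reads
-- grid[i][j] for every j < len(grid[0]) and raises IndexError on a shorter row).
def Pre_countDistinctIslands (grid : List (List Int)) : Prop :=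
  grid ≠ [] ∧ ∀ row ∈ grid, (grid.headD []).length ≤ row.length
instance (grid : List (List Int)) : Decidable (Pre_countDistinctIslands grid) := by
  unfold Pre_countDistinctIslands; infer_instance

def pvWitness_countDistinctIslands : List (List Int) := [[1, 0], [0, 1]]

def Spec_countDistinctIslands (grid : List (List Int)) (out : Int) : Prop :=
  out = countDistinctIslands_alt grid
instance (grid : List (List Int)) (out : Int) : Decidable (Spec_countDistinctIslands grid out) := by
  unfold Spec_countDistinctIslands; infer_instance

-- ===== CLAIM (what is proved, stated in full; the proofs are below) =====
def Claim_equal_countDistinctIslands : Prop :=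
  ∀ (grid : List (List Int)), Dom_countDistinctIslands grid →
    Pre_countDistinctIslands grid →
    Spec_countDistinctIslands grid (countDistinctIslands grid)

-- ===== LEMMAS AND PROOFS =====

theorem pvCount_set_le (row : List Int) (j : Nat) :
    (row.set j 1).count 0 ≤ row.count 0 := by
  induction row generalizing j with
  | nil => simp
  | cons a t ih =>
    cases j with
    | zero =>
      by_cases ha : a = 0 <;> simp [ha]
    | succ j => have := ih j; simp [List.count_cons]; omega

theorem pvCountZeros_modify_le (v : List (List Int)) (i j : Nat) :
    pvCountZeros (v.modify i (fun row => row.set j 1)) ≤ pvCountZeros v := by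
  induction v generalizing i with
  | nil => simp
  | cons a t ih =>
    cases i with
    | zero =>
      have := pvCount_set_le a j
      simp [pvCountZeros, List.modify]; omega
    | succ i =>
      have := ih i
      simp [pvCountZeros, List.modify] at this ⊢
      omega

theorem pvCountZeros_mark_le (v : List (List Int)) (r c : Int) :
    pvCountZeros (pvMark v r c) ≤ pvCountZeros v :=
  pvCountZeros_modify_le v r.toNat c.toNat

-- the A-side dfs applied to a worklist of absolute cells (proof-only device)
def pvProcess (g : List (List Int)) (n m : Int) (fuel : Nat) (br bc : Int)
    (st : PvState) (xs : List (Int × Int)) : PvState :=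
  xs.foldl (fun s x => if pvValid n m g s.1 x.1 x.2 then pvDfsA g n m fuel s x.1 x.2 br bc else s) st

theorem pvDirsA_eq_process (g : List (List Int)) (n m : Int) (fuel : Nat)
    (r c br bc : Int) :
    ∀ (ds : List (Int × Int)) (st : PvState),
      pvDirsA g n m fuel st r c br bc ds
        = pvProcess g n m fuel br bc st (ds.map (fun d => (r + d.1, c + d.2))) := by
  intro ds
  induction ds with
  | nil => intro st; simp [pvDirsA, pvProcess]
  | cons d ds ih =>
    intro st
    have h1 : d.1 + r = r + d.1 := Int.add_comm _ _
    have h2 : d.2 + c = c + d.2 := Int.add_comm _ _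
    simp only [pvDirsA, pvProcess, List.map_cons, List.foldl_cons, h1, h2]
    split
    · exact ih _
    · exact ih _

theorem pvDfsA_succ (g : List (List Int)) (n m : Int) (fuel : Nat)
    (st : PvState) (r c br bc : Int) :
    pvDfsA g n m (fuel + 1) st r c br bc
      = pvProcess g n m fuel br bc
          (pvMark st.1 r c, PySem.Set.add st.2 (r - br, c - bc))
          (pvDirections.map (fun d => (r + d.1, c + d.2))) := by
  simp only [pvDfsA]
  exact pvDirsA_eq_process g n m fuel r c br bc pvDirections _

theorem pvMono (g : List (List Int)) (n m : Int) :
    ∀ fuel : Nat,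
      (∀ (st : PvState) (r c br bc : Int),
        pvCountZeros (pvDfsA g n m fuel st r c br bc).1 ≤ pvCountZeros st.1)
      ∧ (∀ (ds : List (Int × Int)) (st : PvState) (r c br bc : Int),
        pvCountZeros (pvDirsA g n m fuel st r c br bc ds).1 ≤ pvCountZeros st.1) := by
  intro fuel
  induction fuel with
  | zero =>
    have hdfs : ∀ (st : PvState) (r c br bc : Int),
        pvCountZeros (pvDfsA g n m 0 st r c br bc).1 ≤ pvCountZeros st.1 := by
      intro st r c br bc; simp [pvDfsA]
    refine ⟨hdfs, ?_⟩
    intro ds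
    induction ds with
    | nil => intro st r c br bc; simp [pvDirsA]
    | cons d ds ih =>
      intro st r c br bc
      simp only [pvDirsA]
      split
      · exact le_trans (ih _ r c br bc) (hdfs st _ _ br bc)
      · exact ih st r c br bc
  | succ fuel ih =>
    have hdfs : ∀ (st : PvState) (r c br bc : Int),
        pvCountZeros (pvDfsA g n m (fuel + 1) st r c br bc).1 ≤ pvCountZeros st.1 := by
      intro st r c br bc
      simp only [pvDfsA]
      exact le_trans (ih.2 pvDirections _ r c br bc) (pvCountZeros_mark_le st.1 r c)
    refine ⟨hdfs, ?_⟩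
    intro ds
    induction ds with
    | nil => intro st r c br bc; simp [pvDirsA]
    | cons d ds ih2 =>
      intro st r c br bc
      simp only [pvDirsA]
      split
      · exact le_trans (ih2 _ r c br bc) (hdfs st _ _ br bc)
      · exact ih2 st r c br bc

theorem pvProcess_mono (g : List (List Int)) (n m : Int) (fuel : Nat) (br bc : Int) :
    ∀ (xs : List (Int × Int)) (st : PvState),
      pvCountZeros (pvProcess g n m fuel br bc st xs).1 ≤ pvCountZeros st.1 := by
  intro xs
  induction xs with
  | nil => intro st; simp [pvProcess]
  | cons x xs ih =>
    intro st
    simp only [pvProcess, List.foldl_cons]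
    split
    · exact le_trans (ih _) ((pvMono g n m fuel).1 st x.1 x.2 br bc)
    · exact ih st

-- the heart of the equivalence: the explicit-stack fill processes its worklist
-- exactly as A's dfs does, one valid cell (and its whole subtree) at a time
theorem pvMain (g : List (List Int)) (n m br bc : Int) :
    ∀ (k fuel : Nat), k < fuel →
    ∀ (xs : List (Int × Int)) (st : PvState) (stk : List (Int × Int)),
      pvCountZeros st.1 ≤ k →
      pvFillB g n m br bc st (xs ++ stk)
        = pvFillB g n m br bc (pvProcess g n m fuel br bc st xs) stk := by
  intro k
  induction k using Nat.strong_induction_on with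
  | _ k IH =>
    intro fuel hf xs
    induction xs with
    | nil => intro st stk _; simp [pvProcess]
    | cons x xs ih =>
      intro st stk hst
      obtain ⟨r, c⟩ := x
      by_cases hv : pvValid n m g st.1 r c = true
      · obtain ⟨hr, hrn, hc, hcm, hv0, hg1⟩ := pvValid_spec hv
        have hlt : pvCountZeros (pvMark st.1 r c) < pvCountZeros st.1 :=
          pvCountZeros_mark_lt hr hc hv0
        obtain ⟨f, rfl⟩ : ∃ f, fuel = f + 1 := ⟨fuel - 1, by omega⟩
        have hk1 : k - 1 < k := by omega
        have e1 : pvFillB g n m br bc st (((r, c) :: xs) ++ stk)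
            = pvFillB g n m br bc
                (pvMark st.1 r c, PySem.Set.add st.2 (r - br, c - bc))
                (pvDirections.map (fun d => (r + d.1, c + d.2)) ++ (xs ++ stk)) := by
          simp only [List.cons_append, pvFillB]
          rw [dif_pos hv]
        have e2 := IH (k - 1) hk1 f (by omega)
          (pvDirections.map (fun d => (r + d.1, c + d.2)))
          (pvMark st.1 r c, PySem.Set.add st.2 (r - br, c - bc))
          (xs ++ stk) (by simp; omega)
        have e3 : pvProcess g n m f br bc
              (pvMark st.1 r c, PySem.Set.add st.2 (r - br, c - bc))
              (pvDirections.map (fun d => (r + d.1, c + d.2)))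
            = pvDfsA g n m (f + 1) st r c br bc :=
          (pvDfsA_succ g n m f st r c br bc).symm
        have hcz2 : pvCountZeros (pvDfsA g n m (f + 1) st r c br bc).1 ≤ k - 1 := by
          rw [← e3]
          exact le_trans (pvProcess_mono g n m f br bc _ _) (by simp; omega)
        have e4 := IH (k - 1) hk1 (f + 1) (by omega) xs
          (pvDfsA g n m (f + 1) st r c br bc) stk hcz2
        rw [e1, e2, e3, e4]
        congr 1
        simp [pvProcess, hv]
      · have e1 : pvFillB g n m br bc st (((r, c) :: xs) ++ stk)
            = pvFillB g n m br bc st (xs ++ stk) := by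
          simp only [List.cons_append, pvFillB]
          rw [dif_neg hv]
        rw [e1, ih st stk hst]
        congr 1
        simp [pvProcess, hv]

-- a whole island: the stack fill seeded with a valid start cell is A's dfs
theorem pvFill_start (g : List (List Int)) (n m i j : Int) (st : PvState) (fuel : Nat)
    (hf : pvCountZeros st.1 < fuel) (hv : pvValid n m g st.1 i j = true) :
    pvFillB g n m i j st [(i, j)] = pvDfsA g n m fuel st i j i j := by
  have h := pvMain g n m i j (pvCountZeros st.1) fuel hf [(i, j)] st [] (le_refl _)
  simp only [List.append_nil] at h
  rw [h]
  simp [pvProcess, hv, pvFillB]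

-- foldl congruence that carries an invariant of the accumulator
theorem pvFoldlInv {α β : Type} (P : β → Prop) (f h : β → α → β)
    (l : List α) (b : β) (hb : P b)
    (hstep : ∀ b' a, P b' → a ∈ l → f b' a = h b' a ∧ P (f b' a)) :
    l.foldl f b = l.foldl h b ∧ P (l.foldl f b) := by
  induction l generalizing b with
  | nil => exact ⟨rfl, hb⟩
  | cons a l ih =>
    obtain ⟨he, hp⟩ := hstep b a hb (by simp)
    have hrest := ih (f b a) hp (fun b' a' hb' ha' => hstep b' a' hb' (by simp [ha']))
    simp only [List.foldl_cons]
    rw [← he]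
    exact hrest

theorem pvCountZeros_replicate (a b : Nat) :
    pvCountZeros (List.replicate a (List.replicate b (0 : Int))) = a * b := by
  simp [pvCountZeros]

-- the two outer scans agree, given enough fuel and the zero-count invariant
theorem pvOuterEq (grid : List (List Int)) (n m : Int) (N fuel : Nat) (hfuel : N < fuel)
    (init : PvState × List (List (Int × Int))) (hinit : pvCountZeros init.1.1 ≤ N) :
    (PySem.List.pyRange 0 n 1).foldl (fun acc i =>
      (PySem.List.pyRange 0 m 1).foldl (fun (acc : PvState × _) j =>
        if (pvGet2 grid i j == some 1) && (pvGet2 acc.1.1 i j == some 0) then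
          let st := pvDfsA grid n m fuel (acc.1.1, PySem.Set.empty) i j i j
          ((st.1, st.2), pvAddShape acc.2 st.2)
        else acc) acc) init
    = (PySem.List.pyRange 0 n 1).foldl (fun acc i =>
      (PySem.List.pyRange 0 m 1).foldl (fun (acc : PvState × _) j =>
        if (pvGet2 grid i j == some 1) && (pvGet2 acc.1.1 i j == some 0) then
          let st := pvFillB grid n m i j (acc.1.1, PySem.Set.empty) [(i, j)]
          ((st.1, st.2), pvAddShape acc.2 st.2)
        else acc) acc) init := by
  refine (pvFoldlInv (fun acc => pvCountZeros acc.1.1 ≤ N) _ _ _ init hinit ?_).1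
  intro acc i hacc hi
  refine pvFoldlInv (fun acc => pvCountZeros acc.1.1 ≤ N) _ _ _ acc hacc ?_
  intro acc' j hacc' hj
  rw [PySem.List.mem_pyRange_one] at hi hj
  by_cases hcond : ((pvGet2 grid i j == some 1) && (pvGet2 acc'.1.1 i j == some 0)) = true
  · have hco := hcond
    simp only [Bool.and_eq_true, beq_iff_eq] at hco
    have hv : pvValid n m grid acc'.1.1 i j = true := by
      simp [pvValid, hi.1, hi.2, hj.1, hj.2, hco.1, hco.2]
    have hv' : pvValid n m grid ((acc'.1.1, (PySem.Set.empty : List (Int × Int))) : PvState).1 i j = true := hv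
    have hfill := pvFill_start grid n m i j (acc'.1.1, PySem.Set.empty) fuel
      (lt_of_le_of_lt hacc' hfuel) hv'
    constructor
    · simp only [hcond, if_true, hfill]
    · simp only [hcond, if_true]
      exact le_trans ((pvMono grid n m fuel).1 (acc'.1.1, PySem.Set.empty) i j i j) hacc'
  · simp only [hcond]
    exact ⟨rfl, hacc'⟩

theorem pvPortsEq (grid : List (List Int)) :
    countDistinctIslands grid = countDistinctIslands_alt grid := by
  unfold countDistinctIslands countDistinctIslands_alt
  refine congrArg (fun (z : PvState × List (List (Int × Int))) => ((Prod.snd z).length : Int)) ?_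
  exact pvOuterEq grid (grid.length : Int) ((grid.headD []).length : Int)
    ((grid.length : Int).toNat * ((grid.headD []).length : Int).toNat)
    ((grid.length : Int).toNat * ((grid.headD []).length : Int).toNat + 1)
    (by omega)
    _ (by simp [pvCountZeros_replicate])

-- ===== VERDICT (by name: the statement is the Claim_ definition above) =====
theorem countDistinctIslands_spec : Claim_equal_countDistinctIslands := by
  intro grid _ _
  unfold Spec_countDistinctIslands
  exact pvPortsEq grid
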